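-- pv_equiv track=rewrite | github.com/arindamghosh10/Ontology_Automation | ontology_agent/validators.py | check_wikipedia_infobox_type
-- ===== SOURCE A (Python) =====
-- from typing import Optional
--
-- def check_wikipedia_infobox_type(text: str) -> Optional[str]:
--     """
--     Try to determine if a Wikipedia article is about a company, person, or place.
--     Returns: 'company', 'person', 'place', or None if unclear.
--     """
--     text_lower = text[:3000].lower() if text else ""
--
--     company_signals = ["founded", "headquarters", "industry", "parent company",
--                        "revenue", "number of employees", "subsidiaries", "products"]
--     person_signals = ["born", "nationality", "occupation", "spouse",
--                       "children", "alma mater", "years active"]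
--     place_signals = ["population", "area", "country", "elevation",
--                      "time zone", "postal code", "coordinates"]
--
--     company_score = sum(1 for s in company_signals if s in text_lower)
--     person_score = sum(1 for s in person_signals if s in text_lower)
--     place_score = sum(1 for s in place_signals if s in text_lower)
--
--     if company_score > person_score and company_score > place_score:
--         return "company"
--     if person_score > company_score and person_score > place_score:
--         return "person"
--     if place_score > company_score and place_score > person_score:
--         return "place"
--     return None
-- ===== SOURCE B (Python) =====
-- from typing import Optional
--
-- def check_wikipedia_infobox_type(text: str) -> Optional[str]:
--     """Single pass over a flat weighted signal list accumulating three pairwise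
--     margins (company-person, company-place, person-place); decide by margin signs,
--     never forming per-category scores."""
--     text_lower = text[:3000].lower() if text else ""
--     company = ["founded", "headquarters", "industry", "parent company",
--                "revenue", "number of employees", "subsidiaries", "products"]
--     person = ["born", "nationality", "occupation", "spouse",
--               "children", "alma mater", "years active"]
--     place = ["population", "area", "country", "elevation",
--              "time zone", "postal code", "coordinates"]
--     entries = ([(s, 1, 1, 0) for s in company]
--                + [(s, -1, 0, 1) for s in person]
--                + [(s, 0, -1, -1) for s in place])
--     d_cp = d_cl = d_pl = 0
--     for s, wcp, wcl, wpl in entries: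
--         if s in text_lower:
--             d_cp += wcp
--             d_cl += wcl
--             d_pl += wpl
--     if d_cp > 0 and d_cl > 0:
--         return "company"
--     if d_cp < 0 and d_pl > 0:
--         return "person"
--     if d_cl < 0 and d_pl < 0:
--         return "place"
--     return None
-- ===== Notes on version B (the rewrite author's own statement) =====
-- stated objective: alternative
-- what changed: Instead of computing three per-category scores and comparing them pairwise, B makes a single pass over one flat weighted signal list accumulating three pairwise margins (company-person, company-place, person-place) and decides by the signs of those margins; per-category scores are never formed.
import Mathlib
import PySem

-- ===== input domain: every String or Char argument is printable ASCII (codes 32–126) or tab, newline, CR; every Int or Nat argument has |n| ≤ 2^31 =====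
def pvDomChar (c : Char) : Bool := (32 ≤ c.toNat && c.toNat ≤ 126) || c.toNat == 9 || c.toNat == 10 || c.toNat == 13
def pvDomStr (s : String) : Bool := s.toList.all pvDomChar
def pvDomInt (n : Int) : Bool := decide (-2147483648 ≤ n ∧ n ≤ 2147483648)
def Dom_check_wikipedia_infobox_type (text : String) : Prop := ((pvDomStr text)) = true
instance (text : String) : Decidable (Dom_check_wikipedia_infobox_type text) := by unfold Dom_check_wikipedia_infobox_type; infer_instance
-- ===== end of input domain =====

-- B replaces A's three per-category counts plus pairwise comparisons by one pass over a
-- flat weighted signal list accumulating three pairwise margins, deciding by their signs.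

-- ===== PORT A =====
def check_wikipedia_infobox_type (text : String) : Option String :=
  let text_lower := if text ≠ "" then PySem.Str.lower (PySem.Str.slice text none (some 3000)) else ""
  let company_signals := ["founded", "headquarters", "industry", "parent company",
                          "revenue", "number of employees", "subsidiaries", "products"]
  let person_signals := ["born", "nationality", "occupation", "spouse",
                         "children", "alma mater", "years active"]
  let place_signals := ["population", "area", "country", "elevation",
                        "time zone", "postal code", "coordinates"]
  let company_score := (company_signals.map (fun s => if PySem.Str.isIn s text_lower then (1:Int) else 0)).sum
  let person_score := (person_signals.map (fun s => if PySem.Str.isIn s text_lower then (1:Int) else 0)).sum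
  let place_score := (place_signals.map (fun s => if PySem.Str.isIn s text_lower then (1:Int) else 0)).sum
  if company_score > person_score ∧ company_score > place_score then some "company"
  else if person_score > company_score ∧ person_score > place_score then some "person"
  else if place_score > company_score ∧ place_score > person_score then some "place"
  else none

-- ===== PORT B =====
-- one accumulating pass: (d_cp, d_cl, d_pl) margins, updated per matched signal
def pvStepB (text_lower : String) (acc : Int × Int × Int) (e : String × Int × Int × Int) :
    Int × Int × Int :=
  if PySem.Str.isIn e.1 text_lower then
    (acc.1 + e.2.1, acc.2.1 + e.2.2.1, acc.2.2 + e.2.2.2)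
  else acc

def check_wikipedia_infobox_type_alt (text : String) : Option String :=
  let text_lower := if text ≠ "" then PySem.Str.lower (PySem.Str.slice text none (some 3000)) else ""
  let company := ["founded", "headquarters", "industry", "parent company",
                  "revenue", "number of employees", "subsidiaries", "products"]
  let person := ["born", "nationality", "occupation", "spouse",
                 "children", "alma mater", "years active"]
  let place := ["population", "area", "country", "elevation",
                "time zone", "postal code", "coordinates"]
  let entries : List (String × Int × Int × Int) :=
    company.map (fun s => (s, (1:Int), (1:Int), (0:Int)))
      ++ person.map (fun s => (s, (-1:Int), (0:Int), (1:Int)))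
      ++ place.map (fun s => (s, (0:Int), (-1:Int), (-1:Int)))
  let m := entries.foldl (pvStepB text_lower) (0, 0, 0)
  if m.1 > 0 ∧ m.2.1 > 0 then some "company"
  else if m.1 < 0 ∧ m.2.2 > 0 then some "person"
  else if m.2.1 < 0 ∧ m.2.2 < 0 then some "place"
  else none

-- ===== PRECONDITION & SPEC =====
def Spec_check_wikipedia_infobox_type (text : String) (out : Option String) : Prop := out = check_wikipedia_infobox_type_alt text
instance (text : String) (out : Option String) : Decidable (Spec_check_wikipedia_infobox_type text out) := by unfold Spec_check_wikipedia_infobox_type; infer_instance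

-- ===== CLAIM (what is proved, stated in full; the proofs are below) =====
def Claim_equal_check_wikipedia_infobox_type : Prop := ∀ (text : String), Dom_check_wikipedia_infobox_type text → Spec_check_wikipedia_infobox_type text (check_wikipedia_infobox_type text)

-- ===== LEMMAS AND PROOFS =====

-- the fold computes, in each component, the sum of the matched entries' weights
lemma pv_foldB (tl : String) (es : List (String × Int × Int × Int)) (a b c : Int) :
    es.foldl (pvStepB tl) (a, b, c) =
      (a + (es.map (fun e => if PySem.Str.isIn e.1 tl then e.2.1 else 0)).sum,
       b + (es.map (fun e => if PySem.Str.isIn e.1 tl then e.2.2.1 else 0)).sum,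
       c + (es.map (fun e => if PySem.Str.isIn e.1 tl then e.2.2.2 else 0)).sum) := by
  induction es generalizing a b c with
  | nil => simp
  | cons e es ih =>
      simp only [List.foldl_cons, List.map_cons, List.sum_cons, pvStepB]
      split
      · rw [ih]; ring_nf
      · rw [ih]; ring_nf

lemma pv_neg_ite (c : Prop) [Decidable c] :
    (if c then (-1 : Int) else 0) = -(if c then (1 : Int) else 0) := by
  split <;> simp

theorem pv_spec_aux (text : String) :
    check_wikipedia_infobox_type text = check_wikipedia_infobox_type_alt text := by
  unfold check_wikipedia_infobox_type check_wikipedia_infobox_type_alt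
  simp only [List.map_cons, List.map_nil, List.cons_append, List.nil_append, pv_foldB,
    List.sum_cons, List.sum_nil, pv_neg_ite, ite_self, add_zero, zero_add]
  generalize (if text ≠ "" then PySem.Str.lower (PySem.Str.slice text none (some 3000)) else "") = tl
  generalize (if PySem.Str.isIn "founded" tl = true then (1:Int) else 0) = a0
  generalize (if PySem.Str.isIn "headquarters" tl = true then (1:Int) else 0) = a1
  generalize (if PySem.Str.isIn "industry" tl = true then (1:Int) else 0) = a2
  generalize (if PySem.Str.isIn "parent company" tl = true then (1:Int) else 0) = a3
  generalize (if PySem.Str.isIn "revenue" tl = true then (1:Int) else 0) = a4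
  generalize (if PySem.Str.isIn "number of employees" tl = true then (1:Int) else 0) = a5
  generalize (if PySem.Str.isIn "subsidiaries" tl = true then (1:Int) else 0) = a6
  generalize (if PySem.Str.isIn "products" tl = true then (1:Int) else 0) = a7
  generalize (if PySem.Str.isIn "born" tl = true then (1:Int) else 0) = b0
  generalize (if PySem.Str.isIn "nationality" tl = true then (1:Int) else 0) = b1
  generalize (if PySem.Str.isIn "occupation" tl = true then (1:Int) else 0) = b2
  generalize (if PySem.Str.isIn "spouse" tl = true then (1:Int) else 0) = b3
  generalize (if PySem.Str.isIn "children" tl = true then (1:Int) else 0) = b4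
  generalize (if PySem.Str.isIn "alma mater" tl = true then (1:Int) else 0) = b5
  generalize (if PySem.Str.isIn "years active" tl = true then (1:Int) else 0) = b6
  generalize (if PySem.Str.isIn "population" tl = true then (1:Int) else 0) = c0
  generalize (if PySem.Str.isIn "area" tl = true then (1:Int) else 0) = c1
  generalize (if PySem.Str.isIn "country" tl = true then (1:Int) else 0) = c2
  generalize (if PySem.Str.isIn "elevation" tl = true then (1:Int) else 0) = c3
  generalize (if PySem.Str.isIn "time zone" tl = true then (1:Int) else 0) = c4
  generalize (if PySem.Str.isIn "postal code" tl = true then (1:Int) else 0) = c5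
  generalize (if PySem.Str.isIn "coordinates" tl = true then (1:Int) else 0) = c6
  split_ifs <;> first | rfl | omega

-- ===== VERDICT (by name: the statement is the Claim_ definition above) =====
theorem check_wikipedia_infobox_type_spec : Claim_equal_check_wikipedia_infobox_type := by
  intro text _
  exact pv_spec_aux text
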